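-- pv_equiv track=rewrite | github.com/AnnGits/Codify | script/function.py | delet
-- ===== SOURCE A (Python) =====
-- def delet(a, k, n): #*что удалять*, кол-во раз, *последовательность символов из которой удалять*
--     n = str(n)
--     k = int(k)
--     a = str(a)
--     while k > 0:
--         if a in n:
--             n = n.replace(a, '', 1)
--         k -= 1
--     return n
-- ===== SOURCE B (Python) =====
-- def delet(a, k, n):
--     n = str(n)
--     k = int(k)
--     a = str(a)
--     if not a:
--         return n
--     la = len(a)
--     out = ""
--     removed = 0
--     for c in n:
--         out += c
--         if removed < k and out.endswith(a):
--             out = out[:-la]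
--             removed += 1
--     return out
-- ===== Notes on version B (the rewrite author's own statement) =====
-- stated objective: faster
-- what changed: Replaces the k-iteration loop of full-string replace(a,'',1) scans by a single left-to-right stack pass that pops a just-completed occurrence of a off the output while the removal budget lasts (which also reproduces the cascading removals that replace creates).
import Mathlib
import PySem

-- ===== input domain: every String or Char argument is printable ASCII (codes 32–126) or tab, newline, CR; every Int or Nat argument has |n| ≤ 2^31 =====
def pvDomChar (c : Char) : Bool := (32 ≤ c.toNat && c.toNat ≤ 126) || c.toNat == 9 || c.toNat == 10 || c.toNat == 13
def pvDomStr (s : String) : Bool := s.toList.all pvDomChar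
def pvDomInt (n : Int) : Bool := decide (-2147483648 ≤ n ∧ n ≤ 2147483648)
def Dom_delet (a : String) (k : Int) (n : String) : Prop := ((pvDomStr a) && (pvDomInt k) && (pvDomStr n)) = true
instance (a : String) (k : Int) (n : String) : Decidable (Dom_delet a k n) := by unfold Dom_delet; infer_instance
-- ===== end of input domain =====

-- B replaces A's k-iteration loop of replace(a,'',1) scans by a single stack pass that pops
-- completed occurrences while the removal budget lasts (objective: faster, one pass).


-- ===== PORT A =====
-- hand port of `s.replace(a, '', 1)` (PySem.Chars.replace has no count argument): remove the
-- first occurrence, which starts at index `find s a`; exact because the replacement is '' and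
-- the call site has checked `a in s` (for a = '' find = 0 and the result is s, as in Python).
def deletReplaceOne (a s : List Char) : List Char :=
  let i := (PySem.Chars.find s a).toNat
  s.take i ++ s.drop (i + a.length)

-- `while k > 0: if a in n: n = n.replace(a, '', 1); k -= 1` (fuel = k.toNat iterations)
def deletLoopA (a : List Char) : Nat → List Char → List Char
  | 0, s => s
  | fuel + 1, s =>
      deletLoopA a fuel (if PySem.Chars.isIn a s then deletReplaceOne a s else s)

def delet (a : String) (k : Int) (n : String) : String :=
  -- n = str(n); k = int(k); a = str(a) are identities on these argument types
  String.ofList (deletLoopA a.toList k.toNat n.toList)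

-- ===== PORT B =====
-- loop `for c in n: out += c; if removed < k and out.endswith(a): out = out[:-la]; removed += 1`
-- (`out[:-la]` keeps the first len(out) - la characters; la = al.length ≥ 1 at every call site)
def deletGo (al : List Char) (k : Int) (out rest : List Char) (removed : Nat) : List Char :=
  match rest with
  | [] => out
  | c :: t =>
      let out' := out ++ [c]
      if (removed : Int) < k ∧ PySem.Chars.endswith out' al then
        deletGo al k (out'.take (out'.length - al.length)) t (removed + 1)
      else
        deletGo al k out' t removed

def delet_alt (a : String) (k : Int) (n : String) : String :=
  if a.toList = [] then n
  else String.ofList (deletGo a.toList k [] n.toList 0)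

-- ===== PRECONDITION & SPEC =====
def Spec_delet (a : String) (k : Int) (n : String) (out : String) : Prop := out = delet_alt a k n
instance (a : String) (k : Int) (n : String) (out : String) : Decidable (Spec_delet a k n out) := by unfold Spec_delet; infer_instance

-- ===== CLAIM (what is proved, stated in full; the proofs are below) =====
def Claim_equal_delet : Prop := ∀ (a : String) (k : Int) (n : String), Dom_delet a k n → Spec_delet a k n (delet a k n)

-- ===== LEMMAS AND PROOFS =====

-- if a does not occur in s, A's loop is the identity
theorem deletLoopA_fix (a : List Char) (m : Nat) (s : List Char) (h : ¬ a <:+: s) :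
    deletLoopA a m s = s := by
  induction m with
  | zero => rfl
  | succ f ih =>
      have hin : PySem.Chars.isIn a s = false := (PySem.Chars.isIn_eq_false_iff a s).2 h
      simp [deletLoopA, hin, ih]

-- for a = '' the replace is a no-op, so A's loop is the identity
theorem deletLoopA_nil (m : Nat) (s : List Char) : deletLoopA [] m s = s := by
  induction m with
  | zero => rfl
  | succ f ih =>
      simp [deletLoopA, PySem.Chars.isIn_nil, deletReplaceOne, PySem.Chars.find_nil, ih]

-- find points at a stated first occurrence
theorem find_eq_of_first (a s : List Char) (m : Nat) (h1 : a <+: s.drop m)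
    (h2 : ∀ j < m, ¬ a <+: s.drop j) : PySem.Chars.find s a = (m : Int) := by
  have hin : a <:+: s := by
    rw [← PySem.Chars.isIn_iff_infix, ← PySem.Chars.exists_prefix_drop_iff_isIn]
    exact ⟨m, h1⟩
  have hpos := (PySem.Chars.find_nonneg_iff s a).2 hin
  obtain ⟨hp, hmin⟩ := PySem.Chars.find_spec hpos
  have hEq : (PySem.Chars.find s a).toNat = m := by
    rcases lt_trichotomy (PySem.Chars.find s a).toNat m with hlt | hEq | hgt
    · exact absurd hp (h2 _ hlt)
    · exact hEq
    · exact absurd h1 (hmin _ hgt)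
  omega

-- an occurrence of a wholly inside the first |out| characters is an occurrence in out
theorem infix_of_early_prefix (a out rest : List Char) (j : Nat)
    (hj : j + a.length ≤ out.length) (h : a <+: (out ++ rest).drop j) : a <:+: out := by
  have hd : (out ++ rest).drop j = out.drop j ++ rest :=
    List.drop_append_of_le_length (by omega)
  rw [hd] at h
  have hpre : a <+: out.drop j := by
    have htake := List.prefix_iff_eq_take.1 h
    have hlen : a.length ≤ (out.drop j).length := by
      simp [List.length_drop]; omega
    rw [List.take_append_of_le_length hlen] at htake
    exact htake ▸ List.take_prefix _ _
  obtain ⟨r, hr⟩ := hpre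
  exact ⟨out.take j, r, by rw [List.append_assoc, hr, List.take_append_drop]⟩

-- one A-step removes a leftmost occurrence sitting right after an occurrence-free prefix
theorem stepA_remove (a X t : List Char)
    (h2 : ∀ j < X.length, ¬ a <+: (X ++ a ++ t).drop j) :
    (if PySem.Chars.isIn a (X ++ a ++ t) then deletReplaceOne a (X ++ a ++ t) else (X ++ a ++ t))
      = X ++ t := by
  have hin : a <:+: (X ++ a ++ t) := ⟨X, t, rfl⟩
  have hfind : PySem.Chars.find (X ++ a ++ t) a = (X.length : Int) := by
    refine find_eq_of_first _ _ _ ?_ h2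
    rw [List.append_assoc, List.drop_left' rfl]
    exact ⟨t, rfl⟩
  rw [if_pos ((PySem.Chars.isIn_iff_infix _ _).2 hin)]
  unfold deletReplaceOne
  rw [hfind]
  simp only [Int.toNat_natCast]
  congr 1
  · rw [List.append_assoc, List.take_left]
  · rw [List.drop_left' (by simp)]

-- infix of out ++ [c] is infix of out or a suffix
theorem infix_concat_cases (u v : List Char) (c : Char) (h : u <:+: v ++ [c]) :
    u <:+: v ∨ u <:+ (v ++ [c]) := by
  obtain ⟨p, q, hp⟩ := h
  rcases List.eq_nil_or_concat q with rfl | ⟨q', b, rfl⟩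
  · right; exact ⟨p, by simpa using hp⟩
  · left
    refine ⟨p, q', ?_⟩
    have := congrArg List.dropLast hp
    simpa [List.dropLast_concat, List.dropLast_append_of_ne_nil] using this

-- with the budget exhausted B only copies
theorem deletGo_exhausted (a : List Char) (k : Int) :
    ∀ (rest out : List Char) (removed : Nat), ¬ ((removed : Int) < k) →
      deletGo a k out rest removed = out ++ rest := by
  intro rest
  induction rest with
  | nil => intro out removed _; simp [deletGo]
  | cons c t ih =>
      intro out removed h
      simp only [deletGo, if_neg (by tauto : ¬ ((removed : Int) < k ∧ PySem.Chars.endswith (out ++ [c]) a))]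
      rw [ih _ _ h]; simp

-- MAIN INVARIANT: while out contains no occurrence of a, B's pass computes exactly
-- what A's remaining (k - removed) replace-iterations compute on out ++ rest
theorem deletGo_eq_loopA (a : List Char) (ha : a ≠ []) (k : Int) :
    ∀ (rest out : List Char) (removed : Nat), ¬ a <:+: out →
      deletGo a k out rest removed = deletLoopA a (k - removed).toNat (out ++ rest) := by
  have hla : 1 ≤ a.length := List.length_pos_iff.2 ha
  intro rest
  induction rest with
  | nil =>
      intro out removed hout
      rw [deletLoopA_fix a _ _ (by simpa using hout)]
      simp [deletGo]
  | cons c t ih =>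
      intro out removed hout
      by_cases hb : (removed : Int) < k
      · by_cases hend : PySem.Chars.endswith (out ++ [c]) a = true
        · -- a removal fires: out ++ [c] = X ++ a
          obtain ⟨X, hX⟩ := (PySem.Chars.endswith_iff _ _).1 hend
          have hlenX : X.length = out.length + 1 - a.length := by
            have := congrArg List.length hX; simp at this; omega
          have hXpre : X = out.take X.length := by
            have : X = (out ++ [c]).take X.length := by rw [← hX, List.take_left]
            rwa [List.take_append_of_le_length (by omega)] at this
          have hXout : ¬ a <:+: X := fun hinf => hout
            (hinf.trans (hXpre ▸ (List.take_prefix _ _).isInfix))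
          have hs : out ++ c :: t = X ++ a ++ t := by
            rw [show out ++ c :: t = (out ++ [c]) ++ t from by simp, ← hX]
          have hnoearly : ∀ j < X.length, ¬ a <+: (X ++ a ++ t).drop j := by
            intro j hj hpre
            exact hout (infix_of_early_prefix a out (c :: t) j (by omega) (hs ▸ hpre))
          -- unfold one step of B
          simp only [deletGo, if_pos (And.intro hb hend)]
          have htake : (out ++ [c]).take ((out ++ [c]).length - a.length) = X := by
            rw [← hX]
            simp only [List.length_append]
            rw [show X.length + a.length - a.length = X.length from by omega, List.take_left]
          rw [htake, ih X (removed + 1) hXout]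
          -- unfold one step of A
          have hm : (k - removed).toNat = (k - (removed + 1)).toNat + 1 := by omega
          rw [hs, hm]
          show deletLoopA a ((k - ((removed : Int) + 1)).toNat) _ = _
          rw [show ((removed : Int) + 1) = ((removed + 1 : Nat) : Int) by push_cast; ring]
          exact congrArg _ (stepA_remove a X t hnoearly).symm
        · -- no removal: copy c
          have hout' : ¬ a <:+: (out ++ [c]) := by
            intro hinf
            rcases infix_concat_cases a out c hinf with h | h
            · exact hout h
            · exact hend ((PySem.Chars.endswith_iff _ _).2 h)
          simp only [deletGo, if_neg (by tauto : ¬ ((removed : Int) < k ∧ PySem.Chars.endswith (out ++ [c]) a))]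
          rw [ih _ removed hout']
          simp
      · -- budget exhausted on both sides
        have h0 : (k - removed).toNat = 0 := by omega
        rw [deletGo_exhausted a k (c :: t) out removed hb, h0]
        rfl

-- ===== VERDICT (by name: the statement is the Claim_ definition above) =====
theorem delet_spec : Claim_equal_delet := by
  intro a k n _
  show delet a k n = delet_alt a k n
  unfold delet delet_alt
  by_cases hA : a.toList = []
  · rw [if_pos hA, hA, deletLoopA_nil]; simp
  · rw [if_neg hA, deletGo_eq_loopA a.toList hA k n.toList [] 0 (by simp [hA])]
    simp
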